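-- pv_equiv track=rewrite | github.com/tupkalenkodi/db_spark | python_scripts/generate_subgraphs.py | decode_graph6
-- ===== SOURCE A (Python) =====
-- def decode_graph6(n: int, graph6_str: str):
--     s = graph6_str[1:]
--     total_bits = n * (n - 1) // 2
--
--     all_bits = []
--     for ch in s:
--         c = ord(ch) - 63
--         all_bits.extend([(c >> (5 - i)) & 1 for i in range(6)])
--
--     bits = all_bits[:total_bits]
--     edges = []
--     bit_idx = 0
--
--     for j in range(1, n):
--         for i in range(j):
--             if bit_idx < len(bits):
--                 if bits[bit_idx] == 1:
--                     edges.append([int(i), int(j)])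
--             else:
--                 break
--             bit_idx += 1
--         if bit_idx >= len(bits):
--             break
--
--     return edges
-- ===== SOURCE B (Python) =====
-- def _isqrt(x):
--     # Newton's method for integer square root (floor)
--     if x < 2:
--         return x
--     r = x
--     y = (x + 1) // 2
--     while y < r:
--         r = y
--         y = (y + x // y) // 2
--     return r
--
--
-- def decode_graph6(n, graph6_str):
--     # No edges are possible on fewer than 2 vertices.
--     if n < 2:
--         return []
--     total_bits = n * (n - 1) // 2
--     edges = []
--     for pos, ch in enumerate(graph6_str[1:]):
--         c = ord(ch) - 63
--         for b in range(6):
--             if (c >> (5 - b)) & 1: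
--                 k = 6 * pos + b
--                 if k < total_bits:
--                     # invert the triangular index: k = j*(j-1)//2 + i with 0 <= i < j
--                     j = (1 + _isqrt(8 * k + 1)) // 2
--                     edges.append([k - j * (j - 1) // 2, j])
--     return edges
-- ===== Notes on version B (the rewrite author's own statement) =====
-- stated objective: alternative
-- what changed: Instead of prebuilding a bit table and scanning (i,j) coordinate pairs with nested loops and a running bit index, B visits each set bit independently and recovers its edge endpoints in closed form by inverting the triangular index k = j*(j-1)/2 + i with a Newton integer square root.
import Mathlib
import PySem

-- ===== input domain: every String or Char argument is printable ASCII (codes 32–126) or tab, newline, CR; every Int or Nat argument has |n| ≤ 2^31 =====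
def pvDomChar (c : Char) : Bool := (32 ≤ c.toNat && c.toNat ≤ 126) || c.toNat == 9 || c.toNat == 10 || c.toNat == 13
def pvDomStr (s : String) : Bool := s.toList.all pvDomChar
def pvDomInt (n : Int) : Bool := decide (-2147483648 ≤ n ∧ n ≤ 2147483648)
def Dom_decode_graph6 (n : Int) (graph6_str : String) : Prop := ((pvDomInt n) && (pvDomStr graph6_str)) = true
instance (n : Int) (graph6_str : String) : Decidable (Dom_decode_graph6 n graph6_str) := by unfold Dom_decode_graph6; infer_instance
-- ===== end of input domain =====

-- B decodes each set bit independently, inverting the triangular index k = j(j-1)/2 + i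
-- in closed form with a Newton integer square root, instead of A's coordinate-scanning
-- pair loops over a prebuilt bit table (objective: alternative algorithm).

-- ===== PORT A =====
-- the per-character bit comprehension [(c >> (5 - i)) & 1 for i in range(6)]
def bits6 (ch : Char) : List Int :=
  (PySem.List.pyRange 0 6 1).map
    (fun i => PySem.Int.band (((ch.toNat : Int) - 63) >>> (((5 - i).toNat : Nat) : Int)) 1)

-- inner 'for i in range(j)' loop; returns (bit_idx, edges); early return = Python's 'break'
def pvA_loopI (bits : List Int) (j i : Int) (bit_idx : Nat)
    (edges : List (List Int)) : Nat × List (List Int) :=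
  if h : i < j then
    if bit_idx < bits.length then
      let edges := if bits.getD bit_idx 0 = 1 then edges ++ [[i, j]] else edges
      pvA_loopI bits j (i + 1) (bit_idx + 1) edges
    else (bit_idx, edges)  -- break
  else (bit_idx, edges)
termination_by (j - i).toNat
decreasing_by omega

-- outer 'for j in range(1, n)' loop with its trailing 'if bit_idx >= len(bits): break'
def pvA_loopJ (bits : List Int) (j n : Int) (bit_idx : Nat)
    (edges : List (List Int)) : List (List Int) :=
  if h : j < n then
    let r := pvA_loopI bits j 0 bit_idx edges
    if bits.length ≤ r.1 then r.2 else pvA_loopJ bits (j + 1) n r.1 r.2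
  else edges
termination_by (n - j).toNat
decreasing_by omega

def decode_graph6 (n : Int) (graph6_str : String) : List (List Int) :=
  let s := PySem.List.slice graph6_str.toList (some 1) none   -- graph6_str[1:]
  let total_bits := PySem.Int.floordiv (n * (n - 1)) 2
  let all_bits := s.foldl (fun all_bits ch => all_bits ++ bits6 ch) []
  let bits := PySem.List.slice all_bits none (some total_bits)   -- all_bits[:total_bits]
  pvA_loopJ bits 1 n 0 []

-- ===== PORT B =====
-- Newton's-method integer square root loop from Source B's _isqrt (the two proof arguments
-- only justify termination; the computed values are exactly the Python while loop's)
def pvIsqrtLoop (x r y : Int) (hx : 2 ≤ x) (hy : 1 ≤ y) : Int :=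
  if h : y < r then
    pvIsqrtLoop x y (PySem.Int.floordiv (y + PySem.Int.floordiv x y) 2) hx
      (by
        rw [PySem.Int.le_floordiv_iff_mul_le (by norm_num : (0:Int) < 2)]
        have h0 : (0:Int) ≤ PySem.Int.floordiv x y := by
          rw [PySem.Int.le_floordiv_iff_mul_le (by omega : (0:Int) < y)]; omega
        rcases eq_or_lt_of_le hy with h1 | h1
        · have hfd : PySem.Int.floordiv x y = x := by
            rw [← h1, PySem.Int.floordiv_eq_ediv_of_pos (by norm_num)]; simp
          omega
        · omega)
  else r
termination_by r.toNat
decreasing_by omega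

def pvIsqrt (x : Int) : Int :=
  if h : x < 2 then x
  else
    pvIsqrtLoop x x (PySem.Int.floordiv (x + 1) 2) (by omega)
      (by rw [PySem.Int.le_floordiv_iff_mul_le (by norm_num : (0:Int) < 2)]; omega)

-- body of B's inner 'for b in range(6)' loop
def pvB_inner (total_bits : Int) (pc : Int × Char) (edges : List (List Int)) (b : Int) :
    List (List Int) :=
  let c : Int := (pc.2.toNat : Int) - 63
  if PySem.Int.band (c >>> (((5 - b).toNat : Nat) : Int)) 1 = 1 then
    let k := 6 * pc.1 + b
    if k < total_bits then
      let j := PySem.Int.floordiv (1 + pvIsqrt (8 * k + 1)) 2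
      edges ++ [[k - PySem.Int.floordiv (j * (j - 1)) 2, j]]
    else edges
  else edges

def decode_graph6_alt (n : Int) (graph6_str : String) : List (List Int) :=
  if n < 2 then []   -- no edges are possible on fewer than 2 vertices
  else
    let total_bits := PySem.Int.floordiv (n * (n - 1)) 2
    (PySem.List.enumerate (PySem.List.slice graph6_str.toList (some 1) none)).foldl
      (fun edges pc => (PySem.List.pyRange 0 6 1).foldl (pvB_inner total_bits pc) edges)
      []

-- ===== PRECONDITION & SPEC =====
def Spec_decode_graph6 (n : Int) (graph6_str : String) (out : List (List Int)) : Prop := out = decode_graph6_alt n graph6_str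
instance (n : Int) (graph6_str : String) (out : List (List Int)) : Decidable (Spec_decode_graph6 n graph6_str out) := by unfold Spec_decode_graph6; infer_instance

-- ===== CLAIM (what is proved, stated in full; the proofs are below) =====
def Claim_equal_decode_graph6 : Prop := ∀ (n : Int) (graph6_str : String), Dom_decode_graph6 n graph6_str → Spec_decode_graph6 n graph6_str (decode_graph6 n graph6_str)

-- ===== LEMMAS AND PROOFS =====

-- j index of triangular position k, and the edge B emits for it
def pvJ (k : Int) : Int := PySem.Int.floordiv (1 + pvIsqrt (8 * k + 1)) 2
def pvEdgeL (k : Int) : List Int := [k - PySem.Int.floordiv (pvJ k * (pvJ k - 1)) 2, pvJ k]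
def pvPair (k : Int) : Int × Int := (k - PySem.Int.floordiv (pvJ k * (pvJ k - 1)) 2, pvJ k)

-- contribution of bit b of the character at position pos (B's inner-loop body, flattened)
def pvBbit (tb pos : Int) (ch : Char) (b : Int) : List (List Int) :=
  if PySem.Int.band (((ch.toNat : Int) - 63) >>> (((5 - b).toNat : Nat) : Int)) 1 = 1 ∧ 6 * pos + b < tb
  then [pvEdgeL (6 * pos + b)] else []

-- canonical middle form: scan a bit block bs whose first bit has global index k0
def pvMid (tb : Int) (bs : List Int) (k0 : Int) : List (List Int) :=
  (List.range bs.length).flatMap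
    (fun t => if bs.getD t 0 = 1 ∧ k0 + (t : Int) < tb then [pvEdgeL (k0 + (t : Int))] else [])

-- lockstep consumption of bits and pairs: characterisation of A's result
def pvLock (bits : List Int) (ps : List (Int × Int)) : List (List Int) :=
  match bits, ps with
  | b :: bs, p :: rest => (if b = 1 then [[p.1, p.2]] else []) ++ pvLock bs rest
  | _, _ => []

theorem pvLock_nil_right (bits : List Int) : pvLock bits [] = [] := by
  cases bits <;> rfl

theorem pvLock_nil_left (ps : List (Int × Int)) : pvLock [] ps = [] := by
  cases ps <;> rfl

theorem pvLock_append (ps qs : List (Int × Int)) (bits : List Int) :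
    pvLock bits (ps ++ qs) = pvLock bits ps ++ pvLock (bits.drop ps.length) qs := by
  induction ps generalizing bits with
  | nil => simp [pvLock_nil_right]
  | cons p rest ih =>
    cases bits with
    | nil => simp [pvLock_nil_left]
    | cons b bs => simp [pvLock, ih bs, List.append_assoc]

theorem pvA_loopI_eq (bits : List Int) (j i : Int) (k : Nat)
    (edges : List (List Int)) (hk : k ≤ bits.length) :
    pvA_loopI bits j i k edges =
      (min bits.length (k + (PySem.List.pyRange i j 1).length),
       edges ++ pvLock (bits.drop k) ((PySem.List.pyRange i j 1).map (fun i => (i, j)))) := by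
  induction hd : (j - i).toNat generalizing i k edges with
  | zero =>
    have hij : j ≤ i := by omega
    rw [pvA_loopI, dif_neg (by omega), PySem.List.pyRange_one_eq_nil hij]
    simp [pvLock_nil_right, Nat.min_eq_right hk]
  | succ m ih =>
    have hij : i < j := by omega
    rw [pvA_loopI, dif_pos hij, PySem.List.pyRange_one_cons hij]
    by_cases h : k < bits.length
    · have hdrop : bits[k] :: bits.drop (k + 1) = bits.drop k := List.getElem_cons_drop h
      have hgetD : bits.getD k 0 = bits[k] := List.getD_eq_getElem bits 0 h
      rw [if_pos h]
      simp only [hgetD, ih (i + 1) (k + 1) _ h (by omega), List.map_cons, ← hdrop, pvLock,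
        List.length_cons, Prod.mk.injEq]
      refine ⟨by omega, ?_⟩
      by_cases hb : bits[k] = 1 <;> simp [hb, List.append_assoc]
    · have hke : k = bits.length := by omega
      rw [if_neg h]
      have hnil : bits.drop k = [] := List.drop_eq_nil_of_le (by omega)
      simp only [hnil, pvLock_nil_left, List.append_nil, Prod.mk.injEq]
      exact ⟨by omega, trivial⟩

theorem pvA_loopJ_eq (bits : List Int) (j n : Int) (k : Nat)
    (edges : List (List Int)) (hk : k ≤ bits.length) :
    pvA_loopJ bits j n k edges =
      edges ++ pvLock (bits.drop k)
        ((PySem.List.pyRange j n 1).flatMap (fun j => (PySem.List.pyRange 0 j 1).map (fun i => (i, j)))) := by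
  induction hd : (n - j).toNat generalizing j k edges with
  | zero =>
    have hnj : n ≤ j := by omega
    rw [pvA_loopJ, dif_neg (by omega), PySem.List.pyRange_one_eq_nil hnj]
    simp [pvLock_nil_right]
  | succ m ih =>
    have hjn : j < n := by omega
    rw [pvA_loopJ, dif_pos hjn, PySem.List.pyRange_one_cons hjn]
    have hI := pvA_loopI_eq bits j 0 k edges hk
    simp only [hI, List.flatMap_cons, pvLock_append, List.length_map]
    set L := (PySem.List.pyRange 0 j 1).length with hL
    by_cases hb : bits.length ≤ min bits.length (k + L)
    · have hnil : (bits.drop k).drop L = [] := by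
        rw [List.drop_drop]; exact List.drop_eq_nil_of_le (by omega)
      simp [hb, hnil, pvLock_nil_left]
    · have hmin : min bits.length (k + L) = k + L := by omega
      rw [if_neg hb, hmin, ih (j + 1) (k + L) _ (by omega) (by omega)]
      simp [List.append_assoc]

-- ---- integer square root: Newton loop bounds ----

theorem pvIsqrtLoop_bounds (x : Int) : ∀ (m : Nat) (r y : Int) (hx : 2 ≤ x) (hy : 1 ≤ y),
    r.toNat ≤ m → 1 ≤ r → x < (r + 1) * (r + 1) →
    y = PySem.Int.floordiv (r + PySem.Int.floordiv x r) 2 →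
    1 ≤ pvIsqrtLoop x r y hx hy ∧ pvIsqrtLoop x r y hx hy * pvIsqrtLoop x r y hx hy ≤ x ∧
      x < (pvIsqrtLoop x r y hx hy + 1) * (pvIsqrtLoop x r y hx hy + 1) := by
  intro m
  induction m with
  | zero =>
    intro r y hx hy hm hr hinv hyeq
    omega  -- impossible: 1 ≤ r and r.toNat ≤ 0
  | succ m ih =>
    intro r y hx hy hm hr hinv hyeq
    set q := PySem.Int.floordiv x r with hq
    have hq0 : (0:Int) ≤ q := by
      rw [hq, PySem.Int.le_floordiv_iff_mul_le (by omega : (0:Int) < r)]; omega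
    have hql : q * r ≤ x := by
      rw [← PySem.Int.le_floordiv_iff_mul_le (by omega : (0:Int) < r)]
    have hqu : x < (q + 1) * r := by
      rw [← PySem.Int.floordiv_lt_iff_lt_mul (by omega : (0:Int) < r)]; omega
    have hy2l : y * 2 ≤ r + q := by
      rw [← PySem.Int.le_floordiv_iff_mul_le (by norm_num : (0:Int) < 2), ← hyeq]
    have hy2u : r + q < (y + 1) * 2 := by
      rw [← PySem.Int.floordiv_lt_iff_lt_mul (by norm_num : (0:Int) < 2), ← hyeq]; omega
    rw [pvIsqrtLoop]
    by_cases h : y < r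
    · rw [dif_pos h]
      refine ih y _ hx _ (by omega) (by omega) ?_ rfl
      nlinarith [sq_nonneg (r - q - 1)]   -- x < (y+1)^2 by AM-GM
    · rw [dif_neg h]
      refine ⟨by omega, ?_, hinv⟩
      have hrq : r ≤ q := by omega
      nlinarith

theorem pvIsqrt_bounds (x : Int) (hx : 0 ≤ x) :
    0 ≤ pvIsqrt x ∧ pvIsqrt x * pvIsqrt x ≤ x ∧ x < (pvIsqrt x + 1) * (pvIsqrt x + 1) := by
  rw [pvIsqrt]
  by_cases h : x < 2
  · rw [dif_pos h]
    interval_cases x <;> norm_num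
  · rw [dif_neg h]
    have hxx : PySem.Int.floordiv x x = 1 := by
      rw [PySem.Int.floordiv_eq_iff_of_pos (by omega : (0:Int) < x)]
      constructor <;> nlinarith
    have := pvIsqrtLoop_bounds x x.toNat x (PySem.Int.floordiv (x + 1) 2) (by omega)
      (by rw [PySem.Int.le_floordiv_iff_mul_le (by norm_num : (0:Int) < 2)]; omega)
      (by omega) (by omega) (by nlinarith) (by rw [hxx])
    exact ⟨by omega, this.2.1, this.2.2⟩

-- ---- triangular-index inversion ----

theorem pvJ_eq (j k : Int) (hj : 1 ≤ j) (h1 : j * (j - 1) ≤ 2 * k) (h2 : 2 * k < j * (j + 1)) :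
    pvJ k = j := by
  have hk : 0 ≤ k := by nlinarith
  obtain ⟨hs0, hsl, hsu⟩ := pvIsqrt_bounds (8 * k + 1) (by omega)
  set s := pvIsqrt (8 * k + 1) with hs
  have hlow : 2 * j - 1 ≤ s := by
    by_contra hc
    push Not at hc
    nlinarith
  have hhigh : s ≤ 2 * j := by
    by_contra hc
    push Not at hc
    nlinarith
  rw [pvJ, PySem.Int.floordiv_eq_iff_of_pos (by norm_num : (0:Int) < 2)]
  omega

def pvT (m : Nat) : Nat := m * (m - 1) / 2

theorem pvT_two_mul (m : Nat) : 2 * pvT m = m * (m - 1) := by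
  cases m with
  | zero => rfl
  | succ t =>
    unfold pvT
    rw [Nat.mul_div_cancel']
    have : Even ((t + 1) * t) := by
      rw [Nat.mul_comm]; exact Nat.even_mul_succ_self t
    exact this.two_dvd

theorem pvT_succ (m : Nat) : pvT (m + 1) = pvT m + m := by
  have h1 := pvT_two_mul m
  have h2 := pvT_two_mul (m + 1)
  have h3 : (m + 1) * (m + 1 - 1) = m * (m - 1) + 2 * m := by
    cases m with
    | zero => rfl
    | succ t => simp; ring
  omega

theorem pvT_cast (m : Nat) (hm : 1 ≤ m) : (m : Int) * ((m : Int) - 1) = 2 * (pvT m : Int) := by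
  have h2 : ((2 * pvT m : Nat) : Int) = ((m * (m - 1) : Nat) : Int) := by rw [pvT_two_mul]
  push_cast [Nat.cast_sub hm] at h2
  linarith

theorem pvRow_eq (m : Nat) (hm : 1 ≤ m) :
    (PySem.List.pyRange 0 (m : Int) 1).map (fun i => (i, (m : Int))) =
      (List.range' (pvT m) m).map (fun k : Nat => pvPair (k : Int)) := by
  apply List.ext_getElem
  · simp [PySem.List.length_pyRange_one]
  · intro t h1 h2
    have ht : t < m := by simpa [PySem.List.length_pyRange_one] using h1
    rw [List.getElem_map, List.getElem_map, PySem.List.getElem_pyRange_one, List.getElem_range']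
    have htc : ((t : Int)) < (m : Int) := by exact_mod_cast ht
    have hL := pvT_cast m hm
    have hJ : pvJ ((pvT m + 1 * t : Nat) : Int) = (m : Int) := by
      apply pvJ_eq _ _ (by exact_mod_cast hm)
      · push_cast
        linarith [Int.natCast_nonneg t]
      · push_cast
        nlinarith
    have hfd : PySem.Int.floordiv ((m : Int) * ((m : Int) - 1)) 2 = (pvT m : Int) := by
      rw [hL, PySem.Int.floordiv_eq_iff_of_pos (by norm_num : (0:Int) < 2)]
      constructor <;> linarith
    rw [pvPair, hJ]
    refine Prod.ext ?_ rfl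
    simp only [hfd]
    push_cast
    ring

theorem pvPairs_eq (m : Nat) :
    (PySem.List.pyRange 1 (m : Int) 1).flatMap
        (fun j => (PySem.List.pyRange 0 j 1).map (fun i => (i, j))) =
      (List.range' 0 (pvT m)).map (fun k : Nat => pvPair (k : Int)) := by
  induction m with
  | zero => simp [PySem.List.pyRange_one_eq_nil (by norm_num : (0:Int) ≤ 1), pvT]
  | succ m ih =>
    rcases Nat.eq_zero_or_pos m with hm | hm
    · subst hm
      simp [pvT]
    · have hcast : ((m + 1 : Nat) : Int) = (m : Int) + 1 := by push_cast; ring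
      rw [hcast, PySem.List.pyRange_one_succ_right (by exact_mod_cast hm), List.flatMap_append,
        ih, List.flatMap_cons, List.flatMap_nil, List.append_nil, pvRow_eq m hm, pvT_succ,
        ← List.map_append]
      congr 1
      have := List.range'_append (s := 0) (m := pvT m) (n := m) (step := 1)
      simpa using this

-- ---- lockstep over any pair list, as an indexed flatMap ----

theorem pvLock_eq_flatMap (bits : List Int) : ∀ (ps : List (Int × Int)),
    pvLock bits ps = (List.range (min bits.length ps.length)).flatMap
      (fun t => if bits.getD t 0 = 1 then [[(ps.getD t (0, 0)).1, (ps.getD t (0, 0)).2]] else []) := by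
  induction bits with
  | nil => intro ps; cases ps <;> simp [pvLock]
  | cons b bs ih =>
    intro ps
    cases ps with
    | nil => simp [pvLock]
    | cons p rest =>
      have hmin : min (b :: bs).length (p :: rest).length = min bs.length rest.length + 1 := by
        simp only [List.length_cons]; omega
      rw [hmin, List.range_succ_eq_map, List.flatMap_cons]
      simp only [pvLock, ih rest, List.getD_cons_zero, List.flatMap_map]
      congr 1

-- ---- B's scan, in the middle form ----

theorem pvMid_nil (tb k0 : Int) : pvMid tb [] k0 = [] := rfl

theorem pvMid_cons (tb : Int) (a : Int) (bs : List Int) (k0 : Int) :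
    pvMid tb (a :: bs) k0 =
      (if a = 1 ∧ k0 < tb then [pvEdgeL k0] else []) ++ pvMid tb bs (k0 + 1) := by
  rw [pvMid, List.length_cons, List.range_succ_eq_map, List.flatMap_cons, List.flatMap_map]
  simp only [List.getD_cons_zero, Nat.cast_zero, add_zero, List.getD_cons_succ]
  congr 1
  rw [pvMid]
  congr 1
  funext t
  simp only [Nat.cast_succ]
  have h : k0 + ((t : Int) + 1) = k0 + 1 + (t : Int) := by ring
  rw [h]

theorem pvMid_append (tb : Int) (u v : List Int) (k0 : Int) :
    pvMid tb (u ++ v) k0 = pvMid tb u k0 ++ pvMid tb v (k0 + u.length) := by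
  induction u generalizing k0 with
  | nil => simp [pvMid]
  | cons a u ih =>
    rw [List.cons_append, pvMid_cons, pvMid_cons, ih, List.append_assoc]
    have h : k0 + 1 + (u.length : Int) = k0 + ((a :: u).length : Int) := by
      simp only [List.length_cons]; push_cast; ring
    rw [h]

theorem pvChar_gen (tb k0 : Int) (f : Int → Int) : ∀ (m : Nat),
    (PySem.List.pyRange 0 (m : Int) 1).flatMap
        (fun b => if f b = 1 ∧ k0 + b < tb then [pvEdgeL (k0 + b)] else []) =
      pvMid tb ((PySem.List.pyRange 0 (m : Int) 1).map f) k0 := by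
  intro m
  induction m with
  | zero =>
    rw [show ((0:Nat):Int) = 0 from rfl, PySem.List.pyRange_one_eq_nil (le_refl 0)]
    simp [pvMid_nil]
  | succ m ih =>
    have hc : ((m + 1 : Nat) : Int) = (m : Int) + 1 := by push_cast; ring
    rw [hc, PySem.List.pyRange_one_succ_right (by positivity), List.flatMap_append,
      List.map_append, pvMid_append, ih]
    congr 1
    have hlen : (((PySem.List.pyRange 0 (m : Int) 1).map f).length : Int) = (m : Int) := by
      simp [PySem.List.length_pyRange_one]
    rw [hlen]
    simp [pvMid_cons, pvMid_nil]

theorem pvChar_eq (tb p0 : Int) (ch : Char) :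
    (PySem.List.pyRange 0 6 1).flatMap (pvBbit tb p0 ch) = pvMid tb (bits6 ch) (6 * p0) := by
  have h6 : ((6 : Nat) : Int) = (6 : Int) := by norm_num
  have := pvChar_gen tb (6 * p0)
    (fun i => PySem.Int.band (((ch.toNat : Int) - 63) >>> (((5 - i).toNat : Nat) : Int)) 1) 6
  rw [h6] at this
  rw [bits6, ← this]
  rfl

theorem pvB_chars_eq (tb : Int) (cs : List Char) : ∀ (p0 : Int),
    (PySem.List.enumerate cs p0).flatMap
        (fun pc => (PySem.List.pyRange 0 6 1).flatMap (pvBbit tb pc.1 pc.2)) =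
      pvMid tb (cs.flatMap bits6) (6 * p0) := by
  induction cs with
  | nil => intro p0; simp [PySem.List.enumerate, pvMid_nil]
  | cons ch rest ih =>
    intro p0
    rw [PySem.List.enumerate_cons, List.flatMap_cons, List.flatMap_cons, pvMid_append, ih (p0 + 1)]
    have hlen : ((bits6 ch).length : Int) = 6 := by
      simp [bits6, PySem.List.length_pyRange_one]
    rw [hlen, pvChar_eq]
    have h : 6 * p0 + 6 = 6 * (p0 + 1) := by ring
    rw [h]

theorem pvAlt_eq (n : Int) (g : String) (hn : ¬ n < 2) :
    decode_graph6_alt n g =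
      pvMid (PySem.Int.floordiv (n * (n - 1)) 2)
        ((PySem.List.slice g.toList (some 1) none).flatMap bits6) 0 := by
  simp only [decode_graph6_alt, if_neg hn]
  set tb := PySem.Int.floordiv (n * (n - 1)) 2 with htb
  have hG : ∀ pc : Int × Char, pvB_inner tb pc = fun edges b => edges ++ pvBbit tb pc.1 pc.2 b := by
    intro pc
    funext e b
    simp only [pvB_inner, pvBbit, pvEdgeL, pvJ]
    by_cases h1 : PySem.Int.band (((pc.2.toNat : Int) - 63) >>> (((5 - b).toNat : Nat) : Int)) 1 = 1
    · by_cases h2 : 6 * pc.1 + b < tb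
      · rw [if_pos h1, if_pos h2, if_pos ⟨h1, h2⟩]
      · rw [if_pos h1, if_neg h2, if_neg (fun hc => h2 hc.2), List.append_nil]
    · rw [if_neg h1, if_neg (fun hc => h1 hc.1), List.append_nil]
  have hF : (fun (edges : List (List Int)) (pc : Int × Char) =>
        (PySem.List.pyRange 0 6 1).foldl (pvB_inner tb pc) edges) =
      (fun edges pc => edges ++ (PySem.List.pyRange 0 6 1).flatMap (pvBbit tb pc.1 pc.2)) := by
    funext edges pc
    rw [hG pc, PySem.List.foldl_append_eq_flatMap]
  rw [hF, PySem.List.foldl_append_eq_flatMap, List.nil_append, pvB_chars_eq tb _ 0]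
  norm_num

-- final combinatorial step: A's truncated lockstep scan equals B's guarded full scan
theorem pvFinal (al : List Int) (T : Nat) :
    (List.range (min (al.take T).length
        (((List.range' 0 T).map (fun k : Nat => pvPair (k : Int))).length))).flatMap
      (fun t => if (al.take T).getD t 0 = 1 then
        [[(((List.range' 0 T).map (fun k : Nat => pvPair (k : Int))).getD t (0, 0)).1,
          (((List.range' 0 T).map (fun k : Nat => pvPair (k : Int))).getD t (0, 0)).2]] else [])
    = (List.range al.length).flatMap
      (fun t => if al.getD t 0 = 1 ∧ 0 + (t : Int) < (T : Int) then [pvEdgeL (0 + (t : Int))] else []) := by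
  set M := min T al.length with hM
  have hlen1 : (al.take T).length = min T al.length := List.length_take
  have hlen2 : ((List.range' 0 T).map (fun k : Nat => pvPair (k : Int))).length = T := by
    simp [List.length_range']
  have hmm : min (al.take T).length
      (((List.range' 0 T).map (fun k : Nat => pvPair (k : Int))).length) = M := by
    rw [hlen1, hlen2]; omega
  rw [hmm]
  have hsplit : List.range al.length = List.range' 0 M ++ List.range' M (al.length - M) := by
    rw [List.range_eq_range']
    have := List.range'_append (s := 0) (m := M) (n := al.length - M) (step := 1)
    simp only [one_mul, Nat.zero_add] at this
    rw [this]
    congr 1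
    omega
  rw [hsplit, List.flatMap_append, List.range_eq_range']
  have htail : (List.range' M (al.length - M)).flatMap
      (fun t => if al.getD t 0 = 1 ∧ 0 + (t : Int) < (T : Int) then [pvEdgeL (0 + (t : Int))] else [])
      = (List.range' M (al.length - M)).flatMap (fun _ => ([] : List (List Int))) := by
    apply List.flatMap_congr
    intro t ht
    rw [List.mem_range'_1] at ht
    have hTt : ¬ (0 + (t : Int) < (T : Int)) := by
      have : T ≤ t := by omega
      have := Int.ofNat_le.mpr this
      omega
    rw [if_neg (fun hc => hTt hc.2)]
  have hnil : (List.range' M (al.length - M)).flatMap (fun _ => ([] : List (List Int))) = [] := by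
    simp
  rw [htail, hnil, List.append_nil]
  apply List.flatMap_congr
  intro t ht
  rw [List.mem_range'_1] at ht
  have htT : t < T := by omega
  have htL : t < al.length := by omega
  have h1 : (al.take T).getD t 0 = al.getD t 0 := by
    rw [List.getD_eq_getElem _ _ (by rw [hlen1]; omega), List.getD_eq_getElem _ _ htL,
      List.getElem_take]
  have h2 : ((List.range' 0 T).map (fun k : Nat => pvPair (k : Int))).getD t (0, 0)
      = pvPair (t : Int) := by
    rw [List.getD_eq_getElem _ _ (by rw [hlen2]; omega), List.getElem_map, List.getElem_range']
    norm_num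
  have h3 : (0 + (t : Int) < (T : Int)) := by
    have := Int.ofNat_lt.mpr htT
    omega
  rw [h1, h2]
  by_cases hb : al.getD t 0 = 1
  · rw [if_pos hb, if_pos ⟨hb, h3⟩]
    simp [pvPair, pvEdgeL]
  · rw [if_neg hb, if_neg (fun hc => hb hc.1)]

-- ===== VERDICT (by name: the statement is the Claim_ definition above) =====
theorem decode_graph6_spec : Claim_equal_decode_graph6 := by
  intro n g _
  unfold Spec_decode_graph6 decode_graph6
  simp only [PySem.List.foldl_append_eq_flatMap, List.nil_append]
  by_cases hn : n < 2
  · rw [pvA_loopJ_eq _ _ _ 0 [] (Nat.zero_le _), List.drop_zero,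
      PySem.List.pyRange_one_eq_nil (by omega : n ≤ 1), List.flatMap_nil, pvLock_nil_right]
    simp [decode_graph6_alt, hn]
  · rw [pvAlt_eq n g hn]
    set al := (PySem.List.slice g.toList (some 1) none).flatMap bits6 with hal
    set m := n.toNat with hm
    have hmn : ((m : Nat) : Int) = n := by omega
    have htb : PySem.Int.floordiv (n * (n - 1)) 2 = ((pvT m : Nat) : Int) := by
      have h1 : n * (n - 1) = ((m * (m - 1) : Nat) : Int) := by
        rw [← hmn]
        push_cast [Nat.cast_sub (by omega : 1 ≤ m)]
        ring
      rw [h1]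
      have := PySem.Int.floordiv_natCast (m * (m - 1)) 2
      exact_mod_cast this
    rw [pvA_loopJ_eq _ _ _ 0 [] (Nat.zero_le _), List.drop_zero, List.nil_append, htb,
      PySem.List.slice_to _ (by positivity), Int.toNat_natCast, ← hmn, pvPairs_eq m,
      pvLock_eq_flatMap, pvMid]
    exact pvFinal al (pvT m)
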